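-- pv_equiv track=rewrite | github.com/mbalesni/openpilot-pipeline | train/dataloader.py | merge_timings
-- ===== SOURCE A (Python) =====
-- def merge_timings(arr):
-- 	"""
-- 	Merge timings from different runs.
--
-- 	Args:
-- 		arr (list): list of dicts with timings
--
-- 	Returns:
-- 		dict: merged timings
-- 	"""
-- 	merged = {}
-- 	for item in arr:
-- 		for key, value in item.items():
-- 			if key not in merged:
-- 				merged[key] = {'time': 0, 'count': 0}
-- 			merged[key]['time'] += value['time']
-- 			merged[key]['count'] += value['count']
-- 	return merged
-- ===== SOURCE B (Python) =====
-- def merge_timings(arr):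
-- 	"""Gather-then-reduce: first pass groups the value dicts per key (first-seen
-- 	key order), second pass sums each group into the merged dict."""
-- 	groups = {}
-- 	for item in arr:
-- 		for key, value in item.items():
-- 			groups.setdefault(key, []).append(value)
-- 	return {key: {'time': sum(v['time'] for v in values),
-- 	              'count': sum(v['count'] for v in values)}
-- 	        for key, values in groups.items()}
-- ===== Notes on version B (the rewrite author's own statement) =====
-- stated objective: alternative
-- what changed: Replaced A's single streaming loop that accumulates sums in place into the merged dict with a two-pass gather-then-reduce: pass 1 groups each key's value dicts into lists (preserving first-seen key order), pass 2 builds the merged dict by summing each group with sum() inside a dict comprehension.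
import Mathlib
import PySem

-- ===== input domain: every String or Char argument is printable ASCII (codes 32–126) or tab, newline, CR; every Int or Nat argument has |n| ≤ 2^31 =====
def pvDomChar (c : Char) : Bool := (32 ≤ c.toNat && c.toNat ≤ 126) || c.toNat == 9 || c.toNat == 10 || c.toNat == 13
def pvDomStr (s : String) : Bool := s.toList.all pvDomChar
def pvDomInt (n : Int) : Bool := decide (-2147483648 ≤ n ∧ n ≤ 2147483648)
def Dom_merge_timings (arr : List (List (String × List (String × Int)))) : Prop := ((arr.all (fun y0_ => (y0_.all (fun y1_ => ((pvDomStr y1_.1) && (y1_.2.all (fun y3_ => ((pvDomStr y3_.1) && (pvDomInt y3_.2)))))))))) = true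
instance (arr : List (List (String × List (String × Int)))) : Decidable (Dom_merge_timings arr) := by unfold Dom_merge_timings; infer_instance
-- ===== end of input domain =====

-- B replaces A's streaming in-place accumulation with a two-pass gather-then-reduce
-- (group the value dicts per key, then sum each group); alternative decomposition, not faster.


-- value['time'] / value['count']: Python dict lookup (first match); Python raises KeyError
-- when the key is absent — those inputs are excluded by Pre_merge_timings, so the 0 default is never used there.
def mtGet (value : List (String × Int)) (k : String) : Int :=
  ((PySem.Dict.mk value).get? k).getD 0

-- ===== PORT A =====
-- body of A's inner loop: lazily insert the zero entry, then add value['time'] and value['count'] in place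
def mtStepA (merged : PySem.Dict String (PySem.Dict String Int))
    (kv : String × List (String × Int)) : PySem.Dict String (PySem.Dict String Int) :=
  let merged := if merged.contains kv.1 then merged
                else merged.insert kv.1 (PySem.Dict.mk [("time", (0:Int)), ("count", (0:Int))])
  let d := merged.getD kv.1 (PySem.Dict.mk [])
  let d := d.modify "time" (0:Int) (· + mtGet kv.2 "time")
  let d := d.modify "count" (0:Int) (· + mtGet kv.2 "count")
  merged.insert kv.1 d

def merge_timings (arr : List (List (String × List (String × Int)))) : List (String × List (String × Int)) :=
  let merged := arr.foldl (fun merged item => item.foldl mtStepA merged) PySem.Dict.empty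
  merged.items.map (fun p => (p.1, p.2.items))

-- ===== PORT B =====
-- pass 1 step: groups.setdefault(key, []).append(value)
def mtGather (groups : PySem.Dict String (List (List (String × Int))))
    (kv : String × List (String × Int)) : PySem.Dict String (List (List (String × Int))) :=
  groups.modify kv.1 [] (· ++ [kv.2])

-- pass 2: one group becomes {'time': sum(...), 'count': sum(...)}
def mtReduce (values : List (List (String × Int))) : List (String × Int) :=
  [("time", (values.map (fun v => mtGet v "time")).sum),
   ("count", (values.map (fun v => mtGet v "count")).sum)]

def merge_timings_alt (arr : List (List (String × List (String × Int)))) : List (String × List (String × Int)) :=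
  let groups := arr.foldl (fun g item => item.foldl mtGather g) PySem.Dict.empty
  groups.items.map (fun p => (p.1, mtReduce p.2))

-- ===== PRECONDITION & SPEC =====
-- Pre_ excludes exactly the inputs where some value dict lacks the key 'time' or 'count',
-- on which Python A raises KeyError.
def Pre_merge_timings (arr : List (List (String × List (String × Int)))) : Prop :=
  ∀ item ∈ arr, ∀ kv ∈ item,
    (PySem.Dict.mk kv.2).contains "time" = true ∧ (PySem.Dict.mk kv.2).contains "count" = true
instance (arr : List (List (String × List (String × Int)))) : Decidable (Pre_merge_timings arr) := by
  unfold Pre_merge_timings; infer_instance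

def pvWitness_merge_timings : (List (List (String × List (String × Int)))) :=
  [[("frame", [("time", 3), ("count", 1)])], [("frame", [("time", 2), ("count", 1)])]]

def Spec_merge_timings (arr : List (List (String × List (String × Int)))) (out : List (String × List (String × Int))) : Prop := out = merge_timings_alt arr
instance (arr : List (List (String × List (String × Int)))) (out : List (String × List (String × Int))) : Decidable (Spec_merge_timings arr out) := by unfold Spec_merge_timings; infer_instance

-- ===== CLAIM (what is proved, stated in full; the proofs are below) =====
def Claim_equal_merge_timings : Prop := ∀ (arr : List (List (String × List (String × Int)))), Dom_merge_timings arr → Pre_merge_timings arr → Spec_merge_timings arr (merge_timings arr)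

-- ===== LEMMAS AND PROOFS =====

-- R maps B's grouping table to A's accumulator: reduce every group.
def mtR (g : PySem.Dict String (List (List (String × Int)))) : PySem.Dict String (PySem.Dict String Int) :=
  PySem.Dict.mk (g.items.map (fun p => (p.1, PySem.Dict.mk (mtReduce p.2))))

theorem mtR_contains (g : PySem.Dict String (List (List (String × Int)))) (k : String) :
    (mtR g).contains k = g.contains k := by
  simp only [mtR, PySem.Dict.contains]
  rw [List.any_map]
  rfl

theorem mtR_get? (g : PySem.Dict String (List (List (String × Int)))) (k : String) :
    (mtR g).get? k = (g.get? k).map (fun vs => PySem.Dict.mk (mtReduce vs)) := by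
  simp only [mtR, PySem.Dict.get?]
  rw [List.find?_map]
  have hp : ((fun p : String × PySem.Dict String Int => p.1 == k) ∘
      (fun p : String × List (List (String × Int)) => (p.1, PySem.Dict.mk (mtReduce p.2))))
      = (fun p : String × List (List (String × Int)) => p.1 == k) := rfl
  rw [hp]
  cases h : g.items.find? (fun p => p.1 == k) <;> simp


theorem mtR_insert (g : PySem.Dict String (List (List (String × Int)))) (k : String)
    (VS : List (List (String × Int))) :
    (mtR g).insert k (PySem.Dict.mk (mtReduce VS)) = mtR (g.insert k VS) := by
  by_cases hc : g.contains k = true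
  · apply PySem.Dict.ext
    rw [PySem.Dict.items_insert_of_contains _ _ ((mtR_contains g k).trans hc)]
    simp only [mtR]
    rw [PySem.Dict.items_insert_of_contains _ _ hc]
    rw [List.map_map, List.map_map]
    apply List.map_congr_left
    intro p hp
    by_cases hpk : (p.1 == k) = true <;> simp [hpk, Function.comp]
  · have hc' : g.contains k = false := by simpa using hc
    apply PySem.Dict.ext
    rw [PySem.Dict.items_insert_of_not_contains _ _ ((mtR_contains g k).trans hc')]
    simp only [mtR]
    rw [PySem.Dict.items_insert_of_not_contains _ _ hc']
    simp

theorem mtStep_comm (g : PySem.Dict String (List (List (String × Int))))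
    (kv : String × List (String × Int)) :
    mtStepA (mtR g) kv = mtR (mtGather g kv) := by
  obtain ⟨k, v⟩ := kv
  show mtStepA (mtR g) (k, v) = mtR (g.insert k (g.getD k [] ++ [v]))
  rw [← mtR_insert]
  by_cases hc : g.contains k = true
  · obtain ⟨vs, hvs⟩ : ∃ vs, g.get? k = some vs := by
      have h := PySem.Dict.contains_eq_isSome_get? g k
      rw [hc] at h
      cases hg : g.get? k
      · rw [hg] at h; simp at h
      · exact ⟨_, rfl⟩
    simp only [mtStepA, mtR_contains, hc, if_pos, PySem.Dict.getD, mtR_get?, hvs]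
    simp [mtReduce, PySem.Dict.modify, PySem.Dict.insert, PySem.Dict.contains,
          PySem.Dict.getD, PySem.Dict.get?, List.find?]
  · have hc' : g.contains k = false := by simpa using hc
    have hgd : g.getD k [] = [] := PySem.Dict.getD_of_not_contains _ _ hc'
    simp only [mtStepA, mtR_contains, hc', Bool.false_eq_true, if_false, hgd]
    rw [PySem.Dict.getD_insert_self, PySem.Dict.insert_insert_self]
    simp [mtReduce, PySem.Dict.modify, PySem.Dict.insert, PySem.Dict.contains,
          PySem.Dict.getD, PySem.Dict.get?, List.find?]

theorem mtFold_comm (L : List (String × List (String × Int)))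
    (g : PySem.Dict String (List (List (String × Int)))) :
    L.foldl mtStepA (mtR g) = mtR (L.foldl mtGather g) := by
  induction L generalizing g with
  | nil => rfl
  | cons kv L ih => simp only [List.foldl_cons, mtStep_comm, ih]

theorem mtFoldFold_comm (arr : List (List (String × List (String × Int)))) :
    arr.foldl (fun m item => item.foldl mtStepA m) PySem.Dict.empty
      = mtR (arr.foldl (fun g item => item.foldl mtGather g) PySem.Dict.empty) := by
  have h : ∀ (g : PySem.Dict String (List (List (String × Int)))),
      arr.foldl (fun m item => item.foldl mtStepA m) (mtR g)
        = mtR (arr.foldl (fun g item => item.foldl mtGather g) g) := by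
    induction arr with
    | nil => intro g; rfl
    | cons item arr ih => intro g; simp only [List.foldl_cons, mtFold_comm, ih]
  exact h (PySem.Dict.mk [])

-- ===== VERDICT (by name: the statement is the Claim_ definition above) =====
theorem merge_timings_spec : Claim_equal_merge_timings := by
  intro arr _ _
  unfold Spec_merge_timings merge_timings merge_timings_alt
  rw [mtFoldFold_comm]
  simp [mtR]
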